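-- pv_equiv track=rewrite | github.com/densdiego/Scripts_Networking | aruba_cx_entry-or-delete_aaa.py | filter_configuration
-- ===== SOURCE A (Python) =====
-- def filter_configuration(output, interface):
--     """Filters the output to show only the configuration of the selected interface."""
--     configurations = output.splitlines()
--     start = False
--     interface_config = []
--
--     for line in configurations:
--         if f"interface {interface}" in line:
--             start = True
--         if start:
--             interface_config.append(line)
--             if line.strip() == "exit":  # Stop capturing at 'exit'
--                 break
--
--     return "\n".join(interface_config)
-- ===== SOURCE B (Python) =====
-- def filter_configuration(output, interface):
--     """Filters the output to show only the configuration of the selected interface."""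
--     lines = output.splitlines()
--     needle = f"interface {interface}"
--     start_idx = next((i for i, l in enumerate(lines) if needle in l), None)
--     if start_idx is None:
--         return ""
--     end_idx = next((j + 1 for j in range(start_idx, len(lines))
--                     if lines[j].strip() == "exit"), len(lines))
--     return "\n".join(lines[start_idx:end_idx])
-- ===== Notes on version B (the rewrite author's own statement) =====
-- stated objective: alternative
-- what changed: Replaced A's flag-driven single pass that accumulates lines into a list with a find-boundaries-then-slice shape: locate the start index of the interface line, locate the inclusive 'exit' end index, and join one slice.
import Mathlib
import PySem

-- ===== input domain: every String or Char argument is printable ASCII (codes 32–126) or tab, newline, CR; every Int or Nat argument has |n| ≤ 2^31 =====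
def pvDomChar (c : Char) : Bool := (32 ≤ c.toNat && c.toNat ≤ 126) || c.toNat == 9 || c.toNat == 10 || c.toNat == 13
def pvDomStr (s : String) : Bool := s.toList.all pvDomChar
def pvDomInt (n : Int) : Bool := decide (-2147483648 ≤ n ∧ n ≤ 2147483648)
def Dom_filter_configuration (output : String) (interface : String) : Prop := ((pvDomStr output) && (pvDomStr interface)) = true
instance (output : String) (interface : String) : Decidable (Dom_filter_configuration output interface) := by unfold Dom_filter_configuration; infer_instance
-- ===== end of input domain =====

-- B replaces A's flag-driven accumulating pass by find-start-index / find-end-index / join one slice (alternative decomposition, same cost).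

-- ===== PORT A =====
-- the 'for line in configurations' loop with its 'start' flag, accumulator and 'break'
def fcA_loop (needle : String) : List String → Bool → List String → List String
  | [], _, acc => acc
  | l :: rest, start, acc =>
    let start := if PySem.Str.isIn needle l then true else start
    if start then
      if PySem.Str.strip l == "exit" then acc ++ [l]        -- break after appending
      else fcA_loop needle rest start (acc ++ [l])
    else fcA_loop needle rest start acc

def filter_configuration (output : String) (interface : String) : String :=
  let configurations := PySem.Str.splitlines output
  PySem.Str.join "\n"
    (fcA_loop (String.ofList ("interface ".toList ++ interface.toList)) configurations false [])

-- ===== PORT B =====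
def filter_configuration_alt (output : String) (interface : String) : String :=
  let lines := PySem.Str.splitlines output
  let needle := String.ofList ("interface ".toList ++ interface.toList)
  match lines.findIdx? (fun l => PySem.Str.isIn needle l) with
  | none => ""
  | some i =>
    let endIdx : Int :=
      match (lines.drop i).findIdx? (fun l => PySem.Str.strip l == "exit") with
      | some k => (i : Int) + (k : Int) + 1
      | none => (lines.length : Int)
    PySem.Str.join "\n" (PySem.List.slice lines (some (i : Int)) (some endIdx))

-- ===== PRECONDITION & SPEC =====
def Spec_filter_configuration (output : String) (interface : String) (out : String) : Prop := out = filter_configuration_alt output interface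
instance (output : String) (interface : String) (out : String) : Decidable (Spec_filter_configuration output interface out) := by unfold Spec_filter_configuration; infer_instance

-- ===== CLAIM (what is proved, stated in full; the proofs are below) =====
def Claim_equal_filter_configuration : Prop := ∀ (output : String) (interface : String), Dom_filter_configuration output interface → Spec_filter_configuration output interface (filter_configuration output interface)

-- ===== LEMMAS AND PROOFS =====

-- what A's loop collects once the flag is set: lines up to and including the first 'exit'
def pvTakeExit : List String → List String
  | [] => []
  | l :: r => if PySem.Str.strip l == "exit" then [l] else l :: pvTakeExit r

theorem fcA_loop_true (needle : String) (rest : List String) (acc : List String) :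
    fcA_loop needle rest true acc = acc ++ pvTakeExit rest := by
  induction rest generalizing acc with
  | nil => simp [fcA_loop, pvTakeExit]
  | cons l r ih =>
    simp only [fcA_loop, pvTakeExit]
    by_cases h : PySem.Str.strip l == "exit"
    · simp [h]
    · simp [h, ih]

theorem fcA_loop_false (needle : String) (rest : List String) (acc : List String) :
    fcA_loop needle rest false acc =
      match rest.findIdx? (fun l => PySem.Str.isIn needle l) with
      | none => acc
      | some i => acc ++ pvTakeExit (rest.drop i) := by
  induction rest generalizing acc with
  | nil => simp [fcA_loop]
  | cons l r ih =>
    by_cases h : PySem.Str.isIn needle l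
    · simp only [fcA_loop, h, if_true, List.findIdx?_cons, List.drop_zero]
      by_cases hx : PySem.Str.strip l == "exit"
      · simp [hx, pvTakeExit]
      · simp [hx, pvTakeExit, fcA_loop_true]
    · simp only [fcA_loop, h, if_false, List.findIdx?_cons, Bool.false_eq_true]
      rw [ih]
      cases hr : r.findIdx? (fun l => PySem.Str.isIn needle l) with
      | none => simp
      | some i => simp

theorem pvTakeExit_eq (xs : List String) :
    pvTakeExit xs =
      match xs.findIdx? (fun l => PySem.Str.strip l == "exit") with
      | some k => xs.take (k + 1)
      | none => xs := by
  induction xs with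
  | nil => simp [pvTakeExit]
  | cons l r ih =>
    simp only [pvTakeExit, List.findIdx?_cons]
    by_cases h : PySem.Str.strip l == "exit"
    · simp [h]
    · have h' : ¬ PySem.Str.strip l = "exit" := by simpa using h
      rw [if_neg (by simpa using h), ih]
      cases hr : r.findIdx? (fun l => PySem.Str.strip l == "exit") with
      | none => simp [h']
      | some k => simp [h']


-- ===== VERDICT (by name: the statement is the Claim_ definition above) =====
theorem filter_configuration_spec : Claim_equal_filter_configuration := by
  intro output interface _
  unfold Spec_filter_configuration filter_configuration filter_configuration_alt
  simp only
  rw [fcA_loop_false]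
  cases hf : (PySem.Str.splitlines output).findIdx?
      (fun l => PySem.Str.isIn (String.ofList ("interface ".toList ++ interface.toList)) l) with
  | none => rfl
  | some i =>
    have hi : i < (PySem.Str.splitlines output).length := (List.findIdx?_eq_some_iff_findIdx_eq.mp hf).1
    simp only [List.nil_append]
    rw [pvTakeExit_eq]
    cases he : ((PySem.Str.splitlines output).drop i).findIdx?
        (fun l => PySem.Str.strip l == "exit") with
    | none =>
      have : PySem.List.slice (PySem.Str.splitlines output) (some (i : Int))
          (some ((PySem.Str.splitlines output).length : Int)) =
          (PySem.Str.splitlines output).drop i := by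
        rw [PySem.List.slice_natCast]
        exact List.take_of_length_le (by simp)
      dsimp only
      rw [this]
    | some k =>
      dsimp only
      have hcast : (i : Int) + (k : Int) + 1 = ((i + k + 1 : Nat) : Int) := by push_cast; ring
      rw [hcast, PySem.List.slice_natCast]
      have : i + k + 1 - i = k + 1 := by omega
      rw [this]
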